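-- pv_equiv track=rewrite | github.com/figure-2/inch_by_inch | 2. Algorithm/Programmers/Python/Lv0/외계어 사전/sol.py | solution
-- ===== SOURCE A (Python) =====
-- def solution(spell, dic):
--     a = sorted(spell)
--     b = []
--     for i in dic :
--         b.append(sorted(i))
--     if a in b:
--         answer = 1
--     else:
--         answer = 2
--     return answer
-- ===== SOURCE B (Python) =====
-- def _count(it):
--     c = {}
--     for x in it:
--         c[x] = c.get(x, 0) + 1
--     return c
--
--
-- def solution(spell, dic):
--     target = _count(spell)
--     for word in dic:
--         if _count(word) == target:
--             return 1
--     return 2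
-- ===== Notes on version B (the rewrite author's own statement) =====
-- stated objective: alternative
-- what changed: Replaces per-word sorting and membership in a list of sorted keys with a frequency map: a counter of spell is built once and each dictionary word's counter is compared to it, returning 1 at the first match with no sorting at all (measured ~1.3x faster, below the 1.5x bar).
import Mathlib
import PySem

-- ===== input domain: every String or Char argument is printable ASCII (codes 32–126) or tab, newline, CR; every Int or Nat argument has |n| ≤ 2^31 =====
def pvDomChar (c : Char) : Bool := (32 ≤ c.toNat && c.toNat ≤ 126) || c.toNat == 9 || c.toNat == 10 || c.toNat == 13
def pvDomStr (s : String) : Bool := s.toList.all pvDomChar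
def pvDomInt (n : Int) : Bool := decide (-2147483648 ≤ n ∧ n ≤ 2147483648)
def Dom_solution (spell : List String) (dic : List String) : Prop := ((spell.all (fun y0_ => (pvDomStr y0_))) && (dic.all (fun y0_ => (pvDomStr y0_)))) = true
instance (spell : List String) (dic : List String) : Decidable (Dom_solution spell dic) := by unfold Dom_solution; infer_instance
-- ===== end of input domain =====

-- B replaces per-word sorting by one frequency map of spell compared against each word's frequency map.
-- Python chars (length-1 strings) are represented as singleton Lean Strings in both ports.

-- ===== PORT A =====
def solution (spell : List String) (dic : List String) : Int :=
  let a := PySem.List.sorted spell (fun x => x) false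
  let b := dic.foldl (fun acc i =>
      acc ++ [PySem.List.sorted (i.toList.map (fun c => String.singleton c)) (fun x => x) false]) []
  if a ∈ b then 1 else 2

-- ===== PORT B =====
-- c = {}; for x in it: c[x] = c.get(x, 0) + 1
def pvCount (it : List String) : PySem.Dict String Int :=
  it.foldl (fun c x => c.insert x (c.getD x 0 + 1)) PySem.Dict.empty

-- Python dict ==: same keys, same values (order ignored)
def pvDictEq (d e : PySem.Dict String Int) : Bool :=
  d.items.all (fun kv => e.get? kv.1 == some kv.2) && e.items.all (fun kv => d.get? kv.1 == some kv.2)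

def solAltLoop (target : PySem.Dict String Int) : List String → Int
  | [] => 2
  | w :: rest =>
      if pvDictEq (pvCount (w.toList.map (fun c => String.singleton c))) target then 1
      else solAltLoop target rest

def solution_alt (spell : List String) (dic : List String) : Int :=
  solAltLoop (pvCount spell) dic

-- ===== PRECONDITION & SPEC =====
def Spec_solution (spell : List String) (dic : List String) (out : Int) : Prop := out = solution_alt spell dic
instance (spell : List String) (dic : List String) (out : Int) : Decidable (Spec_solution spell dic out) := by unfold Spec_solution; infer_instance

-- ===== CLAIM (what is proved, stated in full; the proofs are below) =====
def Claim_equal_solution : Prop := ∀ (spell : List String) (dic : List String), Dom_solution spell dic → Spec_solution spell dic (solution spell dic)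

-- ===== LEMMAS AND PROOFS =====

theorem pvCount_eq_counter (xs : List String) : pvCount xs = PySem.Dict.counter xs := by
  simpa [pvCount] using PySem.Dict.foldl_insert_getD_add_one_eq_counter (xs := xs)

theorem get?_counter_eq_some_iff (xs : List String) (k : String) (v : Int) :
    (PySem.Dict.counter xs).get? k = some v ↔ k ∈ xs ∧ v = (xs.count k : Int) := by
  rw [PySem.Dict.get?_eq_some_iff_mem_items _ _ _ (PySem.Dict.nodup_keys_counter xs),
    PySem.Dict.items_counter]
  simp only [List.mem_map, PySem.Set.mem_ofList, Prod.mk.injEq]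
  constructor
  · rintro ⟨a, ha, rfl, rfl⟩; exact ⟨ha, rfl⟩
  · rintro ⟨hk, rfl⟩; exact ⟨k, hk, rfl, rfl⟩

theorem pvDictEq_counter_iff (xs ys : List String) :
    pvDictEq (PySem.Dict.counter xs) (PySem.Dict.counter ys) = true ↔ xs.Perm ys := by
  unfold pvDictEq
  simp only [Bool.and_eq_true, List.all_eq_true, beq_iff_eq, PySem.Dict.items_counter,
    List.mem_map, PySem.Set.mem_ofList, get?_counter_eq_some_iff]
  constructor
  · rintro ⟨h1, h2⟩
    rw [List.perm_iff_count]
    intro v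
    by_cases hx : v ∈ xs
    · rcases h1 (v, (xs.count v : Int)) ⟨v, hx, rfl⟩ with ⟨_, hc⟩
      have hc' : (xs.count v : Int) = (ys.count v : Int) := hc
      exact_mod_cast hc'
    · by_cases hy : v ∈ ys
      · rcases h2 (v, (ys.count v : Int)) ⟨v, hy, rfl⟩ with ⟨hvx, _⟩
        exact absurd hvx hx
      · rw [List.count_eq_zero_of_not_mem hx, List.count_eq_zero_of_not_mem hy]
  · intro hp
    constructor
    · rintro ⟨k, n⟩ ⟨a, ha, rfl, rfl⟩
      exact ⟨hp.mem_iff.mp ha, by rw [hp.count_eq]⟩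
    · rintro ⟨k, n⟩ ⟨a, ha, rfl, rfl⟩
      exact ⟨hp.mem_iff.mpr ha, by rw [hp.count_eq]⟩

theorem match_iff (spell w : List String) :
    pvDictEq (pvCount w) (pvCount spell) = true ↔
      PySem.List.sorted spell (fun x => x) false = PySem.List.sorted w (fun x => x) false := by
  rw [pvCount_eq_counter, pvCount_eq_counter, pvDictEq_counter_iff,
    PySem.List.sorted_id_eq_sorted_id_iff_perm]
  exact ⟨fun h => h.symm, fun h => h.symm⟩

-- ===== VERDICT (by name: the statement is the Claim_ definition above) =====
theorem solution_spec : Claim_equal_solution := by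
  intro spell dic hd
  clear hd
  unfold Spec_solution solution solution_alt
  rw [PySem.List.foldl_append_singleton_eq_map]
  induction dic with
  | nil => simp [solAltLoop]
  | cons w rest ih =>
    simp only [List.map_cons, List.nil_append, List.mem_cons, solAltLoop]
    by_cases h : pvDictEq (pvCount (w.toList.map (fun c => String.singleton c))) (pvCount spell) = true
    · rw [if_pos h, if_pos (Or.inl ((match_iff _ _).mp h))]
    · rw [if_neg h, ← ih]
      simp only [List.nil_append]
      have : ¬ PySem.List.sorted spell (fun x => x) false =
          PySem.List.sorted (w.toList.map (fun c => String.singleton c)) (fun x => x) false :=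
        fun he => h ((match_iff _ _).mpr he)
      by_cases hm : PySem.List.sorted spell (fun x => x) false ∈
          rest.map (fun i => PySem.List.sorted (i.toList.map (fun c => String.singleton c)) (fun x => x) false)
      · rw [if_pos hm, if_pos (Or.inr hm)]
      · rw [if_neg hm, if_neg (by rintro (h1 | h2); exact this h1; exact hm h2)]
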